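-- pv_equiv track=rewrite | github.com/jier/docsible | docsible/analyzers/complexity_analyzer.py | _detect_cloud_provider
-- ===== SOURCE A (Python) =====
-- from typing import Dict, Any, List, Optional
--
-- def _detect_cloud_provider(modules: List[str]) -> str:
--     """Detect specific cloud provider from modules."""
--     if any("aws" in m or "ec2" in m or "s3" in m or "amazon" in m for m in modules):
--         return "AWS (Amazon Web Services)"
--     elif any("azure" in m for m in modules):
--         return "Microsoft Azure"
--     elif any("gcp" in m or "google.cloud" in m for m in modules):
--         return "Google Cloud Platform"
--     elif any("openstack" in m for m in modules):
--         return "OpenStack"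
--     else:
--         return "Cloud Provider"
-- ===== SOURCE B (Python) =====
-- def _detect_cloud_provider(modules):
--     """Detect specific cloud provider from modules (single pass with flags)."""
--     has_aws = has_azure = has_gcp = has_openstack = False
--     for m in modules:
--         if "aws" in m or "ec2" in m or "s3" in m or "amazon" in m:
--             has_aws = True
--         if "azure" in m:
--             has_azure = True
--         if "gcp" in m or "google.cloud" in m:
--             has_gcp = True
--         if "openstack" in m:
--             has_openstack = True
--     if has_aws:
--         return "AWS (Amazon Web Services)"
--     if has_azure:
--         return "Microsoft Azure"
--     if has_gcp:
--         return "Google Cloud Platform"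
--     if has_openstack:
--         return "OpenStack"
--     return "Cloud Provider"
-- ===== Notes on version B (the rewrite author's own statement) =====
-- stated objective: alternative
-- what changed: Replaces the four independent any()-scans over the module list with one pass that accumulates four boolean flags, followed by the same fixed-priority return chain.
import Mathlib
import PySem

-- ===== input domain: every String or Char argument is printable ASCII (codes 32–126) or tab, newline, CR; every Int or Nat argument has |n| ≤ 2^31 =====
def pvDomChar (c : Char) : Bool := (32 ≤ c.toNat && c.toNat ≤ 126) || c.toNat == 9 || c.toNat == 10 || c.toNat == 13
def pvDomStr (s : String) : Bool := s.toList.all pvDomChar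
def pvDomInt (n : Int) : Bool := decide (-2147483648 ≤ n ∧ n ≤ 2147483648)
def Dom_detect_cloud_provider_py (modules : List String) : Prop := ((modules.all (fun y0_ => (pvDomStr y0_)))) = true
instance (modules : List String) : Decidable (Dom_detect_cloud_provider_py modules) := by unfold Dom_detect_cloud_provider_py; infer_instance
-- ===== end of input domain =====

-- B replaces A's four independent any()-scans by a single pass accumulating four boolean flags (alternative decomposition, same cost).

-- ===== PORT A =====
def detect_cloud_provider_py (modules : List String) : String :=
  if modules.any (fun m => PySem.Str.isIn "aws" m || PySem.Str.isIn "ec2" m || PySem.Str.isIn "s3" m || PySem.Str.isIn "amazon" m) then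
    "AWS (Amazon Web Services)"
  else if modules.any (fun m => PySem.Str.isIn "azure" m) then
    "Microsoft Azure"
  else if modules.any (fun m => PySem.Str.isIn "gcp" m || PySem.Str.isIn "google.cloud" m) then
    "Google Cloud Platform"
  else if modules.any (fun m => PySem.Str.isIn "openstack" m) then
    "OpenStack"
  else
    "Cloud Provider"

-- ===== PORT B =====
-- single loop over modules, state = four flags
def detect_cloud_provider_py_alt (modules : List String) : String :=
  let st := modules.foldl
    (fun (st : Bool × Bool × Bool × Bool) m =>
      ( st.1 || (PySem.Str.isIn "aws" m || PySem.Str.isIn "ec2" m || PySem.Str.isIn "s3" m || PySem.Str.isIn "amazon" m),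
        st.2.1 || PySem.Str.isIn "azure" m,
        st.2.2.1 || (PySem.Str.isIn "gcp" m || PySem.Str.isIn "google.cloud" m),
        st.2.2.2 || PySem.Str.isIn "openstack" m ))
    (false, false, false, false)
  if st.1 then "AWS (Amazon Web Services)"
  else if st.2.1 then "Microsoft Azure"
  else if st.2.2.1 then "Google Cloud Platform"
  else if st.2.2.2 then "OpenStack"
  else "Cloud Provider"

-- ===== PRECONDITION & SPEC =====
def Spec_detect_cloud_provider_py (modules : List String) (out : String) : Prop := out = detect_cloud_provider_py_alt modules
instance (modules : List String) (out : String) : Decidable (Spec_detect_cloud_provider_py modules out) := by unfold Spec_detect_cloud_provider_py; infer_instance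

-- ===== CLAIM (what is proved, stated in full; the proofs are below) =====
def Claim_equal_detect_cloud_provider_py : Prop := ∀ (modules : List String), Dom_detect_cloud_provider_py modules → Spec_detect_cloud_provider_py modules (detect_cloud_provider_py modules)

-- ===== LEMMAS AND PROOFS =====

-- the fold's four flags are exactly the four any()-scans
theorem flags_eq_any (f1 f2 f3 f4 : String → Bool) (modules : List String) (b1 b2 b3 b4 : Bool) :
    modules.foldl
      (fun (st : Bool × Bool × Bool × Bool) m =>
        (st.1 || f1 m, st.2.1 || f2 m, st.2.2.1 || f3 m, st.2.2.2 || f4 m))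
      (b1, b2, b3, b4)
    = (b1 || modules.any f1, b2 || modules.any f2, b3 || modules.any f3, b4 || modules.any f4) := by
  induction modules generalizing b1 b2 b3 b4 with
  | nil => simp
  | cons m ms ih => simp [List.foldl_cons, ih, Bool.or_assoc]

-- ===== VERDICT (by name: the statement is the Claim_ definition above) =====

theorem detect_cloud_provider_py_spec : Claim_equal_detect_cloud_provider_py := by
  intro modules _
  show detect_cloud_provider_py modules = detect_cloud_provider_py_alt modules
  unfold detect_cloud_provider_py detect_cloud_provider_py_alt
  rw [flags_eq_any]
  simp
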